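-- pv_equiv track=rewrite | github.com/nyu-acsys/drift | scripts/table.py | manipulate_input_data
-- ===== SOURCE A (Python) =====
-- def manipulate_input_data(data):
--     res_data = []
--     data = data[2:]
--     temp_data = ""
--     flag = False
--     for x in data:
--         if x == '\n' and flag:
--             flag = False
--             res_data.append(temp_data)
--             temp_data = ''
--         elif x == '\n' and not flag:
--             flag = True
--             continue
--         else:
--             temp_data += x
--     res_data.append(temp_data)
--     return res_data
-- ===== SOURCE B (Python) =====
-- def manipulate_input_data(data):
--     parts = data[2:].split('\n')
--     return [''.join(parts[i:i+2]) for i in range(0, len(parts), 2)]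
-- ===== Notes on version B (the rewrite author's own statement) =====
-- stated objective: simpler
-- what changed: Replaces the per-character flag state machine with a single split on newlines followed by joining consecutive pairs of parts, so record boundaries fall on every second newline without any mutable flag or accumulator.
import Mathlib
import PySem

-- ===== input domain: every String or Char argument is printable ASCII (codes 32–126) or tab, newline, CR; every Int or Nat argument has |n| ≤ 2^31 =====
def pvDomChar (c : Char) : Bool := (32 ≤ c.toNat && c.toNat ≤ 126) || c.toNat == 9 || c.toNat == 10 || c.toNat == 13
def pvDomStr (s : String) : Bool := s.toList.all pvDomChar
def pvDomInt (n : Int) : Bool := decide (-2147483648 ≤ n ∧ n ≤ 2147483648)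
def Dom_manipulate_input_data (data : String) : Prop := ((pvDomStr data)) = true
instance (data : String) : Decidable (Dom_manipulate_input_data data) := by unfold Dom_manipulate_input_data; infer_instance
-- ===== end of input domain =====

-- B replaces A's per-character flag state machine by split('\n') then joining consecutive pairs (simpler; same return value on every string).

-- ===== PORT A =====
-- the for-loop of A over the characters, carrying (res_data, temp_data, flag)
def pvLoopA : List Char → List (List Char) → List Char → Bool → List (List Char) × List Char × Bool
  | [], res, temp, flag => (res, temp, flag)
  | c :: xs, res, temp, flag =>
    if (c == '\n') && flag then pvLoopA xs (res ++ [temp]) [] false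
    else if (c == '\n') && !flag then pvLoopA xs res temp true
    else pvLoopA xs res (temp ++ [c]) flag

def manipulate_input_data (data : String) : List String :=
  let l := PySem.List.slice data.toList (some 2) none
  let st := pvLoopA l [] [] false
  (st.1 ++ [st.2.1]).map String.ofList

-- ===== PORT B =====
def manipulate_input_data_alt (data : String) : List String :=
  let parts := PySem.Chars.splitOn (PySem.List.slice data.toList (some 2) none) ['\n']
  (PySem.List.pyRange 0 (parts.length : Int) 2).map
    (fun i => String.ofList (PySem.Chars.join [] (PySem.List.slice parts (some i) (some (i + 2)))))

-- ===== PRECONDITION & SPEC =====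
def Spec_manipulate_input_data (data : String) (out : List String) : Prop := out = manipulate_input_data_alt data
instance (data : String) (out : List String) : Decidable (Spec_manipulate_input_data data out) := by unfold Spec_manipulate_input_data; infer_instance

-- ===== CLAIM (what is proved, stated in full; the proofs are below) =====
def Claim_equal_manipulate_input_data : Prop := ∀ (data : String), Dom_manipulate_input_data data → Spec_manipulate_input_data data (manipulate_input_data data)

-- ===== LEMMAS AND PROOFS =====

-- split on '\n', structurally (proof-side model of split('\n'))
def pvSplitNl : List Char → List (List Char)
  | [] => [[]]
  | c :: xs =>
    if c = '\n' then [] :: pvSplitNl xs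
    else
      match pvSplitNl xs with
      | [] => [[c]]
      | h :: t => (c :: h) :: t

-- prepend to the first part
def pvConsHead (t : List Char) : List (List Char) → List (List Char)
  | [] => [t]
  | h :: rest => (t ++ h) :: rest

-- join consecutive pairs
def pvPairUp : List (List Char) → List (List Char)
  | [] => []
  | [a] => [a]
  | a :: b :: rest => (a ++ b) :: pvPairUp rest

theorem pvSplitNl_ne_nil (l : List Char) : pvSplitNl l ≠ [] := by
  cases l with
  | nil => simp [pvSplitNl]
  | cons c xs =>
    simp only [pvSplitNl]
    split
    · simp
    · cases h : pvSplitNl xs <;> simp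

theorem pvGo_spec (fuel : Nat) (l cur : List Char) (acc : List (List Char))
    (hf : l.length ≤ fuel) :
    PySem.Chars.splitOn.go ['\n'] fuel l cur acc
      = acc.reverse ++ pvConsHead cur.reverse (pvSplitNl l) := by
  induction fuel generalizing l cur acc with
  | zero =>
    have hl : l = [] := by cases l <;> simp_all
    subst hl
    simp [PySem.Chars.splitOn.go, pvSplitNl, pvConsHead]
  | succ fuel ih =>
    cases l with
    | nil => simp [PySem.Chars.splitOn.go, pvSplitNl, pvConsHead]
    | cons c rest =>
      by_cases hc : c = '\n'
      · subst hc
        have hpre : List.isPrefixOf ['\n'] ('\n' :: rest) = true := by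
          simp [List.isPrefixOf]
        rw [PySem.Chars.splitOn.go, if_pos hpre]
        simp only [List.length_cons, List.length_nil, List.drop_succ_cons,
          List.drop_zero] at hf ⊢
        rw [ih rest [] (cur.reverse :: acc) (by omega)]
        obtain ⟨h, t, hht⟩ : ∃ h t, pvSplitNl rest = h :: t := by
          cases hsp : pvSplitNl rest with
          | nil => exact absurd hsp (pvSplitNl_ne_nil rest)
          | cons h t => exact ⟨h, t, rfl⟩
        simp [pvSplitNl, pvConsHead, hht]
      · have hpre : List.isPrefixOf ['\n'] (c :: rest) = false := by
          simp [List.isPrefixOf]; exact fun h => absurd h.symm hc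
        rw [PySem.Chars.splitOn.go, if_neg (by simp [hpre])]
        simp only [List.length_cons] at hf
        rw [ih rest (c :: cur) acc (by omega)]
        obtain ⟨h, t, hht⟩ : ∃ h t, pvSplitNl rest = h :: t := by
          cases hsp : pvSplitNl rest with
          | nil => exact absurd hsp (pvSplitNl_ne_nil rest)
          | cons h t => exact ⟨h, t, rfl⟩
        simp [pvSplitNl, hc, pvConsHead, hht]

theorem pvSplitOn_eq (l : List Char) :
    PySem.Chars.splitOn l ['\n'] = pvSplitNl l := by
  rw [PySem.Chars.splitOn, pvGo_spec (l.length + 1) l [] [] (by omega)]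
  obtain ⟨h, t, hht⟩ : ∃ h t, pvSplitNl l = h :: t := by
    cases hsp : pvSplitNl l with
    | nil => exact absurd hsp (pvSplitNl_ne_nil l)
    | cons h t => exact ⟨h, t, rfl⟩
  simp [pvConsHead, hht]

-- the loop invariant of A: with flag = false the remaining input contributes
-- pairUp of the split with temp glued onto the first part; with flag = true the
-- first remaining part closes the open record temp.
theorem pvLoopA_spec (l : List Char) : ∀ (res : List (List Char)) (temp : List Char),
    ((pvLoopA l res temp false).1 ++ [(pvLoopA l res temp false).2.1]
        = res ++ pvPairUp (pvConsHead temp (pvSplitNl l)))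
    ∧ ((pvLoopA l res temp true).1 ++ [(pvLoopA l res temp true).2.1]
        = res ++ (match pvSplitNl l with
                  | [] => []
                  | h :: t => (temp ++ h) :: pvPairUp t)) := by
  induction l with
  | nil => intro res temp; simp [pvLoopA, pvSplitNl, pvConsHead, pvPairUp]
  | cons c xs ih =>
    intro res temp
    obtain ⟨h, t, hht⟩ : ∃ h t, pvSplitNl xs = h :: t := by
      cases hsp : pvSplitNl xs with
      | nil => exact absurd hsp (pvSplitNl_ne_nil xs)
      | cons h t => exact ⟨h, t, rfl⟩
    by_cases hc : c = '\n'
    · subst hc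
      constructor
      · -- flag = false: newline sets the flag
        show (pvLoopA ('\n' :: xs) res temp false).1 ++ _ = _
        simp only [pvLoopA, beq_self_eq_true, Bool.and_false,
          Bool.not_false, Bool.and_true, if_false, if_true, Bool.false_eq_true]
        rw [(ih res temp).2]
        simp [pvSplitNl, pvConsHead, hht, pvPairUp]
      · -- flag = true: newline closes the record
        show (pvLoopA ('\n' :: xs) res temp true).1 ++ _ = _
        simp only [pvLoopA, beq_self_eq_true, Bool.and_true, if_true,
          Bool.true_and]
        rw [(ih (res ++ [temp]) []).1]
        simp [pvSplitNl, pvConsHead, hht]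
    · have hb : (c == '\n') = false := by simp [hc]
      constructor
      · show (pvLoopA (c :: xs) res temp false).1 ++ _ = _
        simp only [pvLoopA, hb, Bool.false_and, if_false, Bool.false_eq_true]
        rw [(ih res (temp ++ [c])).1]
        simp [pvSplitNl, hc, pvConsHead, hht]
      · show (pvLoopA (c :: xs) res temp true).1 ++ _ = _
        simp only [pvLoopA, hb, Bool.false_and, if_false, Bool.false_eq_true]
        rw [(ih res (temp ++ [c])).2]
        simp [pvSplitNl, hc, hht]

theorem pvJoin_pair (a b : List Char) :
    PySem.Chars.join [] [a, b] = a ++ b := by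
  simp [PySem.Chars.join, List.intercalate]

-- grouping lemma for B: the comprehension over range(0, len, 2) is pvPairUp
theorem pvPairStep : ∀ (parts : List (List Char)),
    (List.range ((parts.length + 1) / 2)).map
        (fun k => String.ofList (PySem.Chars.join [] ((parts.drop (2 * k)).take 2)))
      = (pvPairUp parts).map String.ofList
  | [] => by simp [pvPairUp]
  | [a] => by simp [pvPairUp, List.range_succ]
  | a :: b :: rest => by
    have hlen : (((a :: b :: rest).length + 1) / 2) = (rest.length + 1) / 2 + 1 := by
      simp only [List.length_cons]; omega
    rw [hlen, List.range_succ_eq_map, List.map_cons, List.map_map]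
    have h0 : String.ofList (PySem.Chars.join [] (((a :: b :: rest).drop (2 * 0)).take 2))
        = String.ofList (a ++ b) := by
      simp [pvJoin_pair]
    rw [h0]
    have hshift : ((fun k => String.ofList (PySem.Chars.join [] (((a :: b :: rest).drop (2 * k)).take 2))) ∘ (· + 1))
        = fun k => String.ofList (PySem.Chars.join [] ((rest.drop (2 * k)).take 2)) := by
      funext k
      have : 2 * (k + 1) = 2 * k + 2 := by omega
      simp [Function.comp, this, List.drop_succ_cons]
    rw [hshift, pvPairStep rest]
    simp [pvPairUp]

-- cast cleanup: pyRange 0 n 2 over slices, reduced to pvPairStep's form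
theorem pvAlt_eq_pairUp (parts : List (List Char)) :
    (PySem.List.pyRange 0 (parts.length : Int) 2).map
        (fun i => String.ofList (PySem.Chars.join [] (PySem.List.slice parts (some i) (some (i + 2)))))
      = (pvPairUp parts).map String.ofList := by
  rw [PySem.List.pyRange_of_pos 0 (parts.length : Int) (by omega), List.map_map]
  have hcount : (if (0 : Int) < (parts.length : Int)
      then (((parts.length : Int) - 0 + 2 - 1) / 2).toNat else 0) = (parts.length + 1) / 2 := by
    split <;> omega
  rw [hcount]
  rw [← pvPairStep parts]
  apply List.map_congr_left
  intro k _
  have h1 : (0 : Int) + 2 * (k : Int) = ((2 * k : Nat) : Int) := by push_cast; ring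
  have h2 : ((2 * k : Nat) : Int) + 2 = (((2 * k + 2 : Nat)) : Int) := by push_cast; ring
  simp only [Function.comp, h1, h2, PySem.List.slice_natCast]
  congr 3
  omega

theorem pvPorts_agree (data : String) :
    manipulate_input_data data = manipulate_input_data_alt data := by
  unfold manipulate_input_data manipulate_input_data_alt
  rw [pvSplitOn_eq, pvAlt_eq_pairUp]
  obtain ⟨h, t, hht⟩ : ∃ h t, pvSplitNl (PySem.List.slice data.toList (some 2) none) = h :: t := by
    cases hsp : pvSplitNl (PySem.List.slice data.toList (some 2) none) with
    | nil => exact absurd hsp (pvSplitNl_ne_nil _)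
    | cons h t => exact ⟨h, t, rfl⟩
  have := (pvLoopA_spec (PySem.List.slice data.toList (some 2) none) [] []).1
  simp only [pvConsHead, hht, List.nil_append] at this
  simp [this, hht]

-- ===== VERDICT (by name: the statement is the Claim_ definition above) =====
theorem manipulate_input_data_spec : Claim_equal_manipulate_input_data := by
  intro data _
  unfold Spec_manipulate_input_data
  exact pvPorts_agree data
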